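-- pv_equiv track=rewrite | github.com/pazbenitzhak/Computer-Science-101-Assignments | ex 5/hw5_315328963.py | prefix_suffix_overlap_hash2
-- ===== SOURCE A (Python) =====
-- def prefix_suffix_overlap_hash2(lst, k):
--     res = []
--     dicty = {}
--     for i in range(len(lst)):
--         if lst[i][:k] in dicty:
--             dicty[lst[i][:k]].append(i)
--         else:
--             dicty.update({lst[i][:k]:[i]})
--     for j in range(len(lst)):
--         if lst[j][-k:] in dicty:
--             for m in range(len(dicty[lst[j][-k:]])):
--                 if dicty[lst[j][-k:]][m]!=j:
--                     res.append((dicty[lst[j][-k:]][m],j))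
--     return res
-- ===== SOURCE B (Python) =====
-- def prefix_suffix_overlap_hash2(lst, k):
--     n = len(lst)
--     return [(i, j)
--             for j in range(n)
--             for i in range(n)
--             if i != j and lst[i][:k] == lst[j][-k:]]
-- ===== Notes on version B (the rewrite author's own statement) =====
-- stated objective: simpler
-- what changed: Replaced the prefix-index dictionary build plus per-suffix bucket scan with a single naive double comprehension over index pairs (j outer, i inner), emitting (i, j) on a direct slice comparison.
import Mathlib
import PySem

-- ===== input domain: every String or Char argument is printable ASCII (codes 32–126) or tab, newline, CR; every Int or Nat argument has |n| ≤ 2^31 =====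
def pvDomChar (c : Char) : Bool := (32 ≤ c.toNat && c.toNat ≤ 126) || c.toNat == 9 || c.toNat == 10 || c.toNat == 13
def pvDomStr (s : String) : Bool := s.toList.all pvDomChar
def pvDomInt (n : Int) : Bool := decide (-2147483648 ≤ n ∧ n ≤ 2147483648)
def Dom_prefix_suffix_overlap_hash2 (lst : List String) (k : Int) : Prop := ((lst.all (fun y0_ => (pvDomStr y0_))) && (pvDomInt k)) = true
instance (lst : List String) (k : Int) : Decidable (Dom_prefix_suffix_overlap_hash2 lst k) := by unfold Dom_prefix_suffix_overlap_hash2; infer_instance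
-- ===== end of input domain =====

-- B replaces A's prefix-indexing dictionary with a plain double loop over index pairs; not faster, but shorter and plainer.

-- ===== PORT A =====
def prefix_suffix_overlap_hash2 (lst : List String) (k : Int) : List (Int × Int) :=
  let dicty : PySem.Dict String (List Int) :=
    (PySem.List.pyRange 0 (PySem.List.len lst) 1).foldl (fun d i =>
      let key := PySem.Str.slice (PySem.List.pyGetD lst i "") none (some k)
      if d.contains key then d.modify key [] (fun v => v ++ [i])
      else d.insert key [i]) PySem.Dict.empty
  (PySem.List.pyRange 0 (PySem.List.len lst) 1).foldl (fun res j =>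
    let key := PySem.Str.slice (PySem.List.pyGetD lst j "") (some (-k)) none
    if dicty.contains key then
      (PySem.List.pyRange 0 (PySem.List.len (dicty.getD key [])) 1).foldl (fun res m =>
        if PySem.List.pyGetD (dicty.getD key []) m (0 : Int) ≠ j then
          res ++ [(PySem.List.pyGetD (dicty.getD key []) m (0 : Int), j)]
        else res) res
    else res) []

-- ===== PORT B =====
def prefix_suffix_overlap_hash2_alt (lst : List String) (k : Int) : List (Int × Int) :=
  (PySem.List.pyRange 0 (PySem.List.len lst) 1).flatMap (fun j =>
    ((PySem.List.pyRange 0 (PySem.List.len lst) 1).filter (fun i =>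
        i != j &&
        (PySem.Str.slice (PySem.List.pyGetD lst i "") none (some k)
          == PySem.Str.slice (PySem.List.pyGetD lst j "") (some (-k)) none))).map
      (fun i => (i, j)))

-- ===== PRECONDITION & SPEC =====
def Spec_prefix_suffix_overlap_hash2 (lst : List String) (k : Int) (out : List (Int × Int)) : Prop := out = prefix_suffix_overlap_hash2_alt lst k
instance (lst : List String) (k : Int) (out : List (Int × Int)) : Decidable (Spec_prefix_suffix_overlap_hash2 lst k out) := by unfold Spec_prefix_suffix_overlap_hash2; infer_instance

-- ===== CLAIM (what is proved, stated in full; the proofs are below) =====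
def Claim_equal_prefix_suffix_overlap_hash2 : Prop := ∀ (lst : List String) (k : Int), Dom_prefix_suffix_overlap_hash2 lst k → Spec_prefix_suffix_overlap_hash2 lst k (prefix_suffix_overlap_hash2 lst k)

-- ===== LEMMAS AND PROOFS =====

-- A's build step (if-contains-then-append-else-insert-[i]) is exactly a Dict.modify with append.
theorem build_step_eq_modify (d : PySem.Dict String (List Int)) (key : String) (i : Int) :
    (if d.contains key then d.modify key [] (fun v => v ++ [i]) else d.insert key [i])
      = d.modify key [] (fun v => v ++ [i]) := by
  cases h : d.contains key
  · simp [h, PySem.Dict.modify, PySem.Dict.insert, PySem.Dict.getD_of_not_contains d ([] : List Int) h]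
  · simp [PySem.Dict.modify]

-- The built dictionary's bucket at c is the increasing list of indices whose k-prefix is c.
theorem bucket_eq (lst : List String) (k : Int) (c : String) :
    (((PySem.List.pyRange 0 (PySem.List.len lst) 1).foldl (fun d i =>
        let key := PySem.Str.slice (PySem.List.pyGetD lst i "") none (some k)
        if d.contains key then d.modify key [] (fun v => v ++ [i])
        else d.insert key [i]) PySem.Dict.empty).getD c [])
      = (PySem.List.pyRange 0 (PySem.List.len lst) 1).filter
          (fun i => PySem.Str.slice (PySem.List.pyGetD lst i "") none (some k) == c) := by
  have h1 : ((PySem.List.pyRange 0 (PySem.List.len lst) 1).foldl (fun d i =>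
        let key := PySem.Str.slice (PySem.List.pyGetD lst i "") none (some k)
        if d.contains key then d.modify key [] (fun v => v ++ [i])
        else d.insert key [i]) PySem.Dict.empty)
      = (((PySem.List.pyRange 0 (PySem.List.len lst) 1).map
          (fun i => (PySem.Str.slice (PySem.List.pyGetD lst i "") none (some k), i))).foldl
          (fun d p => d.modify p.1 [] (fun v => v ++ [p.2])) PySem.Dict.empty) := by
    rw [List.foldl_map]
    congr 1
    funext d i
    exact build_step_eq_modify d _ i
  rw [h1, PySem.Dict.getD_foldl_modify_append]
  simp [List.filter_map, Function.comp_def, List.map_map]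

-- A's inner bucket scan appends the (≠ j) members of v, paired with j, in order.
theorem inner_loop_eq (v : List Int) (j : Int) (res : List (Int × Int)) :
    ((PySem.List.pyRange 0 (PySem.List.len v) 1).foldl (fun res m =>
        if PySem.List.pyGetD v m (0 : Int) ≠ j then
          res ++ [(PySem.List.pyGetD v m (0 : Int), j)]
        else res) res)
      = res ++ (v.filter (fun i => i != j)).map (fun i => (i, j)) := by
  rw [PySem.List.foldl_pyRange_pyGetD (f := fun res x =>
        if x ≠ j then res ++ [(x, j)] else res) (d := (0:Int)) (init := res) (a := 0) (xs := v) le_rfl]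
  simp only [Int.toNat_zero, List.drop_zero]
  have hfun : (fun (res : List (Int × Int)) (x : Int) => if x ≠ j then res ++ [(x, j)] else res)
      = (fun (res : List (Int × Int)) (x : Int) => if (x != j) = true then res ++ [(x, j)] else res) := by
    funext res x; simp [bne_iff_ne]
  rw [hfun, PySem.List.foldl_append_if]

-- ===== VERDICT (by name: the statement is the Claim_ definition above) =====
theorem prefix_suffix_overlap_hash2_spec : Claim_equal_prefix_suffix_overlap_hash2 := by
  intro lst k _
  show prefix_suffix_overlap_hash2 lst k = prefix_suffix_overlap_hash2_alt lst k
  unfold prefix_suffix_overlap_hash2 prefix_suffix_overlap_hash2_alt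
  simp only []
  have hstep : ∀ (res : List (Int × Int)) (j : Int),
      (let key := PySem.Str.slice (PySem.List.pyGetD lst j "") (some (-k)) none
       let dicty := (PySem.List.pyRange 0 (PySem.List.len lst) 1).foldl (fun d i =>
          let key := PySem.Str.slice (PySem.List.pyGetD lst i "") none (some k)
          if d.contains key then d.modify key [] (fun v => v ++ [i])
          else d.insert key [i]) PySem.Dict.empty
       if dicty.contains key then
         (PySem.List.pyRange 0 (PySem.List.len (dicty.getD key [])) 1).foldl (fun res m =>
           if PySem.List.pyGetD (dicty.getD key []) m (0 : Int) ≠ j then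
             res ++ [(PySem.List.pyGetD (dicty.getD key []) m (0 : Int), j)]
           else res) res
       else res)
      = res ++ ((PySem.List.pyRange 0 (PySem.List.len lst) 1).filter (fun i =>
            i != j &&
            (PySem.Str.slice (PySem.List.pyGetD lst i "") none (some k)
              == PySem.Str.slice (PySem.List.pyGetD lst j "") (some (-k)) none))).map
          (fun i => (i, j)) := by
    intro res j
    simp only []
    rw [← List.filter_filter]
    cases h : ((PySem.List.pyRange 0 (PySem.List.len lst) 1).foldl (fun d i =>
        let key := PySem.Str.slice (PySem.List.pyGetD lst i "") none (some k)
        if d.contains key then d.modify key [] (fun v => v ++ [i])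
        else d.insert key [i]) PySem.Dict.empty).contains
          (PySem.Str.slice (PySem.List.pyGetD lst j "") (some (-k)) none)
    · rw [if_neg (by simp)]
      have hb := bucket_eq lst k (PySem.Str.slice (PySem.List.pyGetD lst j "") (some (-k)) none)
      rw [PySem.Dict.getD_of_not_contains _ ([] : List Int) h] at hb
      rw [← hb]
      simp
    · rw [if_pos rfl, inner_loop_eq, bucket_eq]
  rw [show (fun (res : List (Int × Int)) (j : Int) =>
      (let key := PySem.Str.slice (PySem.List.pyGetD lst j "") (some (-k)) none
       let dicty := (PySem.List.pyRange 0 (PySem.List.len lst) 1).foldl (fun d i =>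
          let key := PySem.Str.slice (PySem.List.pyGetD lst i "") none (some k)
          if d.contains key then d.modify key [] (fun v => v ++ [i])
          else d.insert key [i]) PySem.Dict.empty
       if dicty.contains key then
         (PySem.List.pyRange 0 (PySem.List.len (dicty.getD key [])) 1).foldl (fun res m =>
           if PySem.List.pyGetD (dicty.getD key []) m (0 : Int) ≠ j then
             res ++ [(PySem.List.pyGetD (dicty.getD key []) m (0 : Int), j)]
           else res) res
       else res))
      = (fun (res : List (Int × Int)) (j : Int) =>
          res ++ ((PySem.List.pyRange 0 (PySem.List.len lst) 1).filter (fun i =>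
            i != j &&
            (PySem.Str.slice (PySem.List.pyGetD lst i "") none (some k)
              == PySem.Str.slice (PySem.List.pyGetD lst j "") (some (-k)) none))).map
          (fun i => (i, j)))
    from funext fun res => funext fun j => hstep res j]
  rw [PySem.List.foldl_append_eq_flatMap]
  simp
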